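-- pv_equiv track=rewrite | github.com/AdamZhouSE/pythonHomework | Code/CodeRecords/2212/60772/249269.py | execute
-- ===== SOURCE A (Python) =====
-- def execute(n):
--     divisors = []
--     for i in range(1,n+1):
--         if n % i ==0:
--             divisors.append(i)
--     Sum = sum(divisors)
--     if Sum < n*2:
--         return 1
--     else:
--         return 0
-- ===== SOURCE B (Python) =====
-- def execute(n):
--     total = 0
--     i = 1
--     while i * i <= n:
--         if n % i == 0:
--             total += i if i * i == n else i + n // i
--         i += 1
--     return 1 if total < 2 * n else 0
-- ===== Notes on version B (the rewrite author's own statement) =====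
-- stated objective: faster
-- what changed: Instead of scanning all i in 1..n for divisors and summing a list, B iterates i only while i*i <= n and adds each divisor pair (i, n//i) on the fly, comparing the running sum with 2n.
import Mathlib
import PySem

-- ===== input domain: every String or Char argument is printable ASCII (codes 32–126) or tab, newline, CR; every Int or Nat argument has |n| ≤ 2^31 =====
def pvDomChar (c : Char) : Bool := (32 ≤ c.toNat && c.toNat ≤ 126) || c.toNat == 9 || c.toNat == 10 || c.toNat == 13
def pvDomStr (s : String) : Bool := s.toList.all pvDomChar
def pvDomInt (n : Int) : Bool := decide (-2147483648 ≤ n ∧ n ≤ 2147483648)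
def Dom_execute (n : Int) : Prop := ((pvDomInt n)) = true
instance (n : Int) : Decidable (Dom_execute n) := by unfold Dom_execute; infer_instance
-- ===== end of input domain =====

-- B replaces A's scan over all of 1..n by a loop running only while i*i <= n, adding each divisor pair (i, n//i); measured faster.

-- ===== PORT A =====
def execute (n : Int) : Int :=
  let divisors := (PySem.List.pyRange 1 (n+1) 1).foldl
      (fun acc i => if PySem.Int.mod n i == 0 then acc ++ [i] else acc) []
  let Sum := divisors.sum
  if Sum < n * 2 then 1 else 0

-- ===== PORT B =====
-- the 'while i*i <= n' loop of Source B, carrying the running total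
def altLoop (n i acc : Int) : Int :=
  if i * i ≤ n then
    altLoop n (i + 1)
      (if PySem.Int.mod n i == 0 then
         acc + (if i * i == n then i else i + PySem.Int.floordiv n i)
       else acc)
  else acc
termination_by (n + 1 - i).toNat
decreasing_by
  rename_i h
  have hi : i ≤ n := by
    by_cases h0 : i ≤ 0
    · have := mul_self_nonneg i; omega
    · have : i ≤ i * i := le_mul_of_one_le_left (by omega) (by omega)
      omega
  omega

def execute_alt (n : Int) : Int :=
  let total := altLoop n 1 0
  if total < 2 * n then 1 else 0

-- ===== PRECONDITION & SPEC =====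
def Spec_execute (n : Int) (out : Int) : Prop := out = execute_alt n
instance (n : Int) (out : Int) : Decidable (Spec_execute n out) := by unfold Spec_execute; infer_instance

-- ===== CLAIM (what is proved, stated in full; the proofs are below) =====
def Claim_equal_execute : Prop := ∀ (n : Int), Dom_execute n → Spec_execute n (execute n)

-- ===== LEMMAS AND PROOFS =====

-- integer square root of n, as an Int
def isq (n : ℤ) : ℤ := (Nat.sqrt n.toNat : ℤ)

-- per-index contribution of B's loop (with `==`/floordiv already resolved)
def cfun (n j : ℤ) : ℤ := if j ∣ n then (if j * j = n then j else j + n / j) else 0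

lemma isq_nonneg (n : ℤ) : 0 ≤ isq n := Int.natCast_nonneg _

lemma isq_bracket (n : ℤ) (hn : 0 ≤ n) (i : ℤ) (hi : 1 ≤ i) :
    i * i ≤ n ↔ i ≤ isq n := by
  unfold isq
  constructor
  · intro h
    have h1 : i.toNat * i.toNat ≤ n.toNat := by
      have h2 : ((i.toNat * i.toNat : ℕ) : ℤ) ≤ ((n.toNat : ℕ) : ℤ) := by
        push_cast
        rw [Int.toNat_of_nonneg (by omega : (0:ℤ) ≤ i), Int.toNat_of_nonneg hn]
        exact h
      exact_mod_cast h2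
    have := Nat.le_sqrt.mpr h1
    omega
  · intro h
    have hs : ((Nat.sqrt n.toNat : ℤ)) * (Nat.sqrt n.toNat : ℤ) ≤ n := by
      have := Nat.sqrt_le n.toNat
      have h2 : ((Nat.sqrt n.toNat * Nat.sqrt n.toNat : ℕ) : ℤ) ≤ ((n.toNat : ℕ) : ℤ) := by exact_mod_cast this
      push_cast at h2
      rw [Int.toNat_of_nonneg hn] at h2
      exact h2
    have h3 : i * i ≤ (Nat.sqrt n.toNat : ℤ) * (Nat.sqrt n.toNat : ℤ) :=
      mul_le_mul h h (by omega) (by positivity)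
    linarith

lemma isq_sq_le (n : ℤ) (hn : 0 ≤ n) : isq n * isq n ≤ n := by
  unfold isq
  have := Nat.sqrt_le n.toNat
  have h2 : ((Nat.sqrt n.toNat * Nat.sqrt n.toNat : ℕ) : ℤ) ≤ ((n.toNat : ℕ) : ℤ) := by exact_mod_cast this
  push_cast at h2
  rw [Int.toNat_of_nonneg hn] at h2
  exact h2

lemma div_facts (n d : ℤ) (hn : 1 ≤ n) (h1 : 1 ≤ d) (hd : d ∣ n) :
    d * (n / d) = n ∧ 1 ≤ n / d ∧ (n / d) ∣ n ∧ n / (n / d) = d := by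
  obtain ⟨k, rfl⟩ := hd
  have hd0 : d ≠ 0 := by omega
  rw [Int.mul_ediv_cancel_left _ hd0]
  have hk : 1 ≤ k := by nlinarith
  exact ⟨rfl, hk, ⟨d, mul_comm d k⟩, by rw [mul_comm, Int.mul_ediv_cancel_left _ (by omega)]⟩

lemma Icc_insert_left (i s : ℤ) (h : i ≤ s) :
    Finset.Icc i s = insert i (Finset.Icc (i+1) s) := by
  ext j; simp only [Finset.mem_Icc, Finset.mem_insert]; omega

-- A's divisor-list sum, as a Finset sum
lemma sumA (n : ℤ) : ∀ b : ℤ, 0 ≤ b →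
    ((PySem.List.pyRange 1 (b+1) 1).foldl
        (fun acc i => if PySem.Int.mod n i == 0 then acc ++ [i] else acc) []).sum
      = ∑ i ∈ Finset.Icc 1 b, (if i ∣ n then i else 0) := by
  intro b hb
  induction b, hb using Int.le_induction with
  | base =>
      rw [PySem.List.pyRange_one_eq_nil (by omega)]
      simp
  | succ b hb ih =>
      rw [PySem.List.pyRange_one_succ_right (by omega), List.foldl_append]
      simp only [List.foldl_cons, List.foldl_nil]
      have hins : Finset.Icc (1:ℤ) (b+1) = insert (b+1) (Finset.Icc 1 b) := by
        ext j; simp only [Finset.mem_Icc, Finset.mem_insert]; omega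
      rw [hins, Finset.sum_insert (by simp [Finset.mem_Icc])]
      by_cases hdvd : (b+1) ∣ n
      · rw [if_pos (by simp [PySem.Int.mod_eq_zero_iff_dvd, hdvd]), if_pos hdvd]
        rw [List.sum_append, ih]
        simp [add_comm]
      · rw [if_neg (by simp [PySem.Int.mod_eq_zero_iff_dvd, hdvd]), if_neg hdvd]
        rw [ih]
        omega

-- B's loop, as a Finset sum up to the integer square root
lemma altLoop_eq (n : ℤ) (hn : 0 ≤ n) :
    ∀ k : ℕ, ∀ i acc : ℤ, 1 ≤ i → (isq n + 1 - i).toNat ≤ k →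
    altLoop n i acc = acc + ∑ j ∈ Finset.Icc i (isq n), cfun n j := by
  intro k
  induction k with
  | zero =>
      intro i acc hi hk
      rw [altLoop, if_neg (fun h => by have := (isq_bracket n hn i hi).mp h; omega),
          Finset.Icc_eq_empty (by omega)]
      simp
  | succ k ih =>
      intro i acc hi hk
      rw [altLoop]
      by_cases hg : i * i ≤ n
      · have his : i ≤ isq n := (isq_bracket n hn i hi).mp hg
        rw [if_pos hg, ih (i+1) _ (by omega) (by omega),
            Icc_insert_left i (isq n) his, Finset.sum_insert (by simp)]
        have hi0 : (0:ℤ) < i := by omega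
        simp only [beq_iff_eq, PySem.Int.mod_eq_zero_iff_dvd,
          PySem.Int.floordiv_eq_ediv_of_pos hi0, cfun]
        split_ifs <;> ring
      · have : ¬ i ≤ isq n := fun h => hg ((isq_bracket n hn i hi).mpr h)
        rw [if_neg hg, Finset.Icc_eq_empty (by omega)]
        simp

-- the √n divisor-pairing identity: pairing d ↔ n/d matches the two sums
lemma pairing (n : ℤ) (hn : 1 ≤ n) :
    (∑ i ∈ Finset.Icc 1 n, (if i ∣ n then i else 0))
      = ∑ i ∈ Finset.Icc 1 (isq n), cfun n i := by
  classical
  set s := isq n with hsdef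
  have hs0 : 0 ≤ s := isq_nonneg n
  have hss : s * s ≤ n := isq_sq_le n (by omega)
  have hbr : ∀ j : ℤ, 1 ≤ j → (j * j ≤ n ↔ j ≤ s) := fun j hj => isq_bracket n (by omega) j hj
  have hsn : s ≤ n := by
    by_cases h : s = 0
    · omega
    · have : s ≤ s * s := le_mul_of_one_le_left hs0 (by omega)
      omega
  have hnlt : n < (s+1) * (s+1) := by
    by_contra h
    push Not at h
    have := (hbr (s+1) (by omega)).mp h
    omega
  unfold cfun
  rw [← Finset.sum_filter, ← Finset.sum_filter]
  set D : Finset ℤ := (Finset.Icc 1 n).filter (fun i => i ∣ n) with hD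
  set small := D.filter (fun i => i ≤ s) with hsm
  set large := D.filter (fun i => ¬ i ≤ s) with hlg
  set small' := small.filter (fun i => ¬ i * i = n) with hsm'
  have hsplit : ∑ i ∈ small, i + ∑ i ∈ large, i = ∑ i ∈ D, i :=
    Finset.sum_filter_add_sum_filter_not D _ _
  have hidx : (Finset.Icc 1 s).filter (fun i => i ∣ n) = small := by
    ext i
    simp only [hsm, hD, Finset.mem_filter, Finset.mem_Icc]
    constructor
    · rintro ⟨⟨g1, g2⟩, g3⟩; exact ⟨⟨⟨g1, le_trans g2 hsn⟩, g3⟩, g2⟩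
    · rintro ⟨⟨⟨g1, _⟩, g3⟩, g2⟩; exact ⟨⟨g1, g2⟩, g3⟩
  rw [hidx]
  have hrhs : ∑ i ∈ small, (if i * i = n then i else i + n / i)
      = ∑ i ∈ small, i + ∑ i ∈ small', n / i := by
    have h1 : ∀ i ∈ small, (if i * i = n then i else i + n / i)
        = i + (if ¬ i * i = n then n / i else 0) := by
      intro i _
      by_cases h : i * i = n
      · simp [h]
      · simp [h]
    rw [Finset.sum_congr rfl h1, Finset.sum_add_distrib, ← Finset.sum_filter]
  rw [hrhs]
  have hbij : ∑ i ∈ large, i = ∑ i ∈ small', n / i := by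
    apply Finset.sum_nbij' (fun d => n / d) (fun d => n / d)
    · -- forward membership: d > √n maps to n/d ≤ √n, a non-square-root divisor
      intro d hd
      simp only [hlg, hD, Finset.mem_filter, Finset.mem_Icc] at hd
      obtain ⟨⟨⟨h1, h2⟩, hdvd⟩, hds⟩ := hd
      obtain ⟨hde, he1, hedvd, hinv⟩ := div_facts n d hn h1 hdvd
      have hen : n / d ≤ n := Int.le_of_dvd (by omega) hedvd
      have hes : n / d ≤ s := by
        by_contra hcon
        push Not at hcon
        have : (s+1) * (s+1) ≤ d * (n / d) :=
          mul_le_mul (by omega) (by omega) (by omega) (by omega)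
        omega
      have hne : ¬ (n / d) * (n / d) = n := by
        intro h
        have he0 : n / d ≠ 0 := by omega
        have : d = n / d := mul_right_cancel₀ he0 (hde.trans h.symm)
        omega
      simp only [hsm', hsm, hD, Finset.mem_filter, Finset.mem_Icc]
      exact ⟨⟨⟨⟨he1, hen⟩, hedvd⟩, hes⟩, hne⟩
    · -- backward membership: a non-square-root divisor d ≤ √n maps to n/d > √n
      intro d hd
      simp only [hsm', hsm, hD, Finset.mem_filter, Finset.mem_Icc] at hd
      obtain ⟨⟨⟨⟨h1, h2⟩, hdvd⟩, hds⟩, hdd⟩ := hd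
      obtain ⟨hde, he1, hedvd, hinv⟩ := div_facts n d hn h1 hdvd
      have hen : n / d ≤ n := Int.le_of_dvd (by omega) hedvd
      have hnots : ¬ n / d ≤ s := by
        intro hes
        have ha : d * (n / d) ≤ s * (n / d) := mul_le_mul_of_nonneg_right hds (by omega)
        have hb : s * (n / d) ≤ s * s := mul_le_mul_of_nonneg_left hes hs0
        have hse : s * (n / d) = n := by omega
        have hs1 : 1 ≤ s := by omega
        have hd_eq : d = s := mul_right_cancel₀ (by omega : n / d ≠ 0) (by omega : d * (n/d) = s * (n/d))
        have he_eq : n / d = s := by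
          have := mul_left_cancel₀ (by omega : s ≠ 0) (show s * (n/d) = s * s by omega)
          exact this
        apply hdd
        rw [hd_eq]
        omega
      simp only [hlg, hD, Finset.mem_filter, Finset.mem_Icc]
      exact ⟨⟨⟨he1, hen⟩, hedvd⟩, hnots⟩
    · -- left inverse
      intro d hd
      simp only [hlg, hD, Finset.mem_filter, Finset.mem_Icc] at hd
      obtain ⟨⟨⟨h1, h2⟩, hdvd⟩, hds⟩ := hd
      exact (div_facts n d hn h1 hdvd).2.2.2
    · -- right inverse
      intro d hd
      simp only [hsm', hsm, hD, Finset.mem_filter, Finset.mem_Icc] at hd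
      obtain ⟨⟨⟨⟨h1, h2⟩, hdvd⟩, hds⟩, hdd⟩ := hd
      exact (div_facts n d hn h1 hdvd).2.2.2
    · -- values agree across the bijection
      intro d hd
      simp only [hlg, hD, Finset.mem_filter, Finset.mem_Icc] at hd
      obtain ⟨⟨⟨h1, h2⟩, hdvd⟩, hds⟩ := hd
      exact ((div_facts n d hn h1 hdvd).2.2.2).symm
  omega

-- ===== VERDICT (by name: the statement is the Claim_ definition above) =====
theorem execute_spec : Claim_equal_execute := by
  intro n _
  unfold Spec_execute execute execute_alt
  dsimp only
  by_cases hn : n ≤ 0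
  · rw [PySem.List.pyRange_one_eq_nil (by omega), altLoop]
    simp
    omega
  · have hn : 0 < n := by omega
    rw [sumA n n (by omega),
        altLoop_eq n (by omega) (isq n + 1 - 1).toNat 1 0 le_rfl (by omega),
        pairing n (by omega), zero_add, mul_comm]
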